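-- pv_equiv track=rewrite | github.com/svend4/meta | projects/hexalg/hexalg.py | difference_multiset
-- ===== SOURCE A (Python) =====
-- def difference_multiset(subset):
--     """
--     Разностный мультимножество D(A) = {a ⊕ b : a, b ∈ A, a ≠ b}.
--     Возвращает dict {diff: count}.
--     """
--     A = list(subset)
--     counts = {}
--     for a in A:
--         for b in A:
--             if a != b:
--                 d = a ^ b
--                 counts[d] = counts.get(d, 0) + 1
--     return counts
-- ===== SOURCE B (Python) =====
-- from collections import Counter
--
-- def difference_multiset(subset):
--     freq = Counter(subset)
--     items = list(freq.items())
--     updates = ((x ^ y, cx * cy)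
--                for x, cx in items
--                for y, cy in items
--                if x != y)
--     counts = {}
--     for d, w in updates:
--         counts[d] = counts.get(d, 0) + w
--     return counts
-- ===== Notes on version B (the rewrite author's own statement) =====
-- stated objective: alternative
-- what changed: B builds a frequency Counter of the values once, materialises a flat list of (x^y, freq[x]*freq[y]) updates by a comprehension over ordered pairs of distinct values, and aggregates that list into the dict in one separate pass, instead of A's in-place counting inside a nested scan over all position pairs; key insertion order and counts are preserved exactly.
import Mathlib
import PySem

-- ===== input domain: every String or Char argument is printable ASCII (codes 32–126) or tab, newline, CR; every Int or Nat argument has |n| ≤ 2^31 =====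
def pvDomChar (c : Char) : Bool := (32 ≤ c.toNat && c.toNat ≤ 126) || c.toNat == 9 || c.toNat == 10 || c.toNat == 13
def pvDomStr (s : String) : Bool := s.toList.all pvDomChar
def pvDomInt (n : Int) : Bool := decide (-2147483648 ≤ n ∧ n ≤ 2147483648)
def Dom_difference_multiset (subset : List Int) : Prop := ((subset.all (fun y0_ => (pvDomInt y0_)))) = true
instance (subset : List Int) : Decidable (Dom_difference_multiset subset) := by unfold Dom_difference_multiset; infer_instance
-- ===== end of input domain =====

-- B builds a frequency Counter once, materialises a flat list of weighted (x^y, freq[x]*freq[y])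
-- updates over ordered pairs of distinct values, and aggregates it in one separate pass, instead
-- of A's in-place counting inside a nested scan over all position pairs (objective: alternative).

-- ===== PORT A =====
def difference_multiset (subset : List Int) : List (Int × Int) :=
  let A := subset
  let counts : PySem.Dict Int Int :=
    A.foldl (fun counts a =>
      A.foldl (fun counts b =>
        if a != b then
          let d := PySem.Int.bxor a b
          counts.insert d (counts.getD d 0 + 1)
        else counts) counts) PySem.Dict.empty
  counts.items

-- ===== PORT B =====
def difference_multiset_alt (subset : List Int) : List (Int × Int) :=
  let freq := PySem.Dict.counter subset
  let updates : List (Int × Int) :=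
    freq.items.flatMap (fun p =>
      (freq.items.filter (fun q => p.1 != q.1)).map (fun q =>
        (PySem.Int.bxor p.1 q.1, p.2 * q.2)))
  let counts : PySem.Dict Int Int :=
    updates.foldl (fun counts dw => counts.insert dw.1 (counts.getD dw.1 0 + dw.2))
      PySem.Dict.empty
  counts.items

-- ===== PRECONDITION & SPEC =====
def Spec_difference_multiset (subset : List Int) (out : List (Int × Int)) : Prop := out = difference_multiset_alt subset
instance (subset : List Int) (out : List (Int × Int)) : Decidable (Spec_difference_multiset subset out) := by unfold Spec_difference_multiset; infer_instance

-- ===== CLAIM (what is proved, stated in full; the proofs are below) =====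
def Claim_equal_difference_multiset : Prop := ∀ (subset : List Int), Dom_difference_multiset subset → Spec_difference_multiset subset (difference_multiset subset)

-- ===== LEMMAS AND PROOFS =====

-- The single counting step both programs perform: counts[p.1] = counts.get(p.1, 0) + p.2.
def pvUpd (c : PySem.Dict Int Int) (p : Int × Int) : PySem.Dict Int Int :=
  c.insert p.1 (c.getD p.1 0 + p.2)

-- Flat list of (key, weight) updates performed by port A's nested loop.
def pvUA (A : List Int) : List (Int × Int) :=
  A.flatMap (fun a => (A.filter (fun b => a != b)).map (fun b => (PySem.Int.bxor a b, (1 : Int))))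

-- Flat list of (key, weight) updates built by port B's comprehension over F = counter items.
def pvUB (F : List (Int × Int)) : List (Int × Int) :=
  F.flatMap (fun p => (F.filter (fun q => p.1 != q.1)).map (fun q => (PySem.Int.bxor p.1 q.1, p.2 * q.2)))

-- Total weight an update list contributes to key k.
def pvSum (U : List (Int × Int)) (k : Int) : Int :=
  ((U.filter (fun p => p.1 == k)).map (·.2)).sum

lemma pvA_flat (subset : List Int) :
    difference_multiset subset = ((pvUA subset).foldl pvUpd PySem.Dict.empty).items := by
  simp only [difference_multiset, pvUA, List.flatMap_def, List.foldl_flatten, List.foldl_map,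
    List.foldl_filter, pvUpd]

lemma pvB_flat (subset : List Int) :
    difference_multiset_alt subset
      = ((pvUB (PySem.Dict.counter subset).items).foldl pvUpd PySem.Dict.empty).items := rfl

lemma pvGetD_foldl (U : List (Int × Int)) : ∀ (d : PySem.Dict Int Int) (k : Int),
    (U.foldl pvUpd d).getD k 0 = d.getD k 0 + pvSum U k := by
  induction U with
  | nil => intro d k; simp [pvSum]
  | cons p U ih =>
    intro d k
    simp only [List.foldl_cons, ih, pvUpd, pvSum, List.filter_cons]
    rcases eq_or_ne p.1 k with h | h
    · simp [h]; ring
    · simp [h, Ne.symm h, PySem.Dict.getD_insert, beq_iff_eq]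

lemma pvItems_flat (U : List (Int × Int)) :
    ((U.foldl pvUpd PySem.Dict.empty).items)
      = (PySem.Set.ofList (U.map (·.1))).map (fun k => (k, pvSum U k)) := by
  have hk : (U.foldl pvUpd PySem.Dict.empty).keys = PySem.Set.ofList (U.map (·.1)) := by
    have h := PySem.Dict.keys_foldl_insert_key U (fun p => p.1) (fun d x => d.getD x.1 0 + x.2)
      (PySem.Dict.empty (κ := Int) (ν := Int))
    simpa [pvUpd, PySem.Set.update_nil_left] using h
  have hnd : (U.foldl pvUpd PySem.Dict.empty).keys.Nodup := by
    have h := PySem.Dict.nodup_keys_foldl_insert_key U (fun p => p.1) (fun d x => d.getD x.1 0 + x.2)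
      (PySem.Dict.empty (κ := Int) (ν := Int)) (by simp)
    simpa [pvUpd] using h
  rw [PySem.Dict.items_eq_map_keys _ hnd 0, hk]
  exact List.map_congr_left fun k _ => by rw [pvGetD_foldl]; simp

-- ---- set-of-keys machinery ----

lemma pvUpdate_flatMap {β : Type} (f : β → List Int) :
    ∀ (xs : List β) (s : PySem.Set Int),
      PySem.Set.update s (xs.flatMap f) = xs.foldl (fun s a => PySem.Set.update s (f a)) s := by
  intro xs
  induction xs with
  | nil => intro s; simp
  | cons a xs ih => intro s; simp only [List.flatMap_cons, PySem.Set.update_append, List.foldl_cons, ih]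

lemma pvUpdate_congr {l l' : List Int} (h : PySem.Set.ofList l = PySem.Set.ofList l')
    (s : PySem.Set Int) : PySem.Set.update s l = PySem.Set.update s l' := by
  rw [PySem.Set.update_eq_append_filter, PySem.Set.update_eq_append_filter, h]

lemma pvUpdate_of_subset {l : List Int} {s : PySem.Set Int} (h : ∀ y ∈ l, y ∈ s) :
    PySem.Set.update s l = s := by
  rw [PySem.Set.update_eq_append_filter]
  have : List.filter (fun y => !s.contains y) (PySem.Set.ofList l) = [] := by
    rw [List.filter_eq_nil_iff]
    intro y hy
    have := h y ((PySem.Set.mem_ofList l y).1 hy)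
    simp [this]
  rw [this, List.append_nil]

lemma pvMem_update_left {y : Int} {s : PySem.Set Int} (l : List Int) (h : y ∈ s) :
    y ∈ PySem.Set.update s l := by
  rw [PySem.Set.update_eq_append_filter]; exact List.mem_append_left _ h

lemma pvMem_update_right {y : Int} {l : List Int} (s : PySem.Set Int) (h : y ∈ l) :
    y ∈ PySem.Set.update s l := by
  by_cases hs : y ∈ s
  · exact pvMem_update_left l hs
  · rw [PySem.Set.update_eq_append_filter]
    refine List.mem_append_right _ ?_
    rw [List.mem_filter]
    exact ⟨(PySem.Set.mem_ofList l y).2 h, by simp [hs]⟩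

lemma pvMem_foldl_update {β : Type} (h : β → List Int) {y : Int} :
    ∀ (xs : List β) (s : PySem.Set Int), y ∈ s → y ∈ xs.foldl (fun s a => PySem.Set.update s (h a)) s := by
  intro xs
  induction xs with
  | nil => intro s hy; exact hy
  | cons a xs ih => intro s hy; exact ih _ (pvMem_update_left _ hy)

lemma pvMem_foldl_update_of_mem {β : Type} [BEq β] [LawfulBEq β] (h : β → List Int) {a : β} {y : Int} :
    ∀ (xs : List β) (s : PySem.Set Int), a ∈ xs → y ∈ h a →
      y ∈ xs.foldl (fun s a => PySem.Set.update s (h a)) s := by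
  intro xs
  induction xs with
  | nil => intro s hx _; cases hx
  | cons b xs ih =>
    intro s hx hy
    rcases List.mem_cons.1 hx with rfl | hx
    · exact pvMem_foldl_update h xs _ (pvMem_update_right _ hy)
    · exact ih _ hx hy

lemma pvFoldl_update_dedup {β : Type} [BEq β] [LawfulBEq β] (h : β → List Int) :
    ∀ (xs : List β) (s : PySem.Set Int),
      xs.foldl (fun s a => PySem.Set.update s (h a)) s
        = (PySem.Set.ofList xs).foldl (fun s a => PySem.Set.update s (h a)) s := by
  intro xs
  induction xs using List.reverseRecOn with
  | nil => intro s; rfl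
  | append_singleton xs a ih =>
    intro s
    rw [List.foldl_append, PySem.Set.ofList_append, PySem.Set.update_cons, PySem.Set.update_nil]
    by_cases ha : a ∈ xs
    · have hadd : (PySem.Set.ofList xs).add a = PySem.Set.ofList xs := by
        simp [PySem.Set.add, PySem.Set.mem_ofList, ha]
      rw [hadd, ← ih s]
      simp only [List.foldl_cons, List.foldl_nil]
      exact pvUpdate_of_subset (fun y hy => pvMem_foldl_update_of_mem h xs s ha hy)
    · have hadd : (PySem.Set.ofList xs).add a = PySem.Set.ofList xs ++ [a] := by
        simp [PySem.Set.add, PySem.Set.mem_ofList, ha]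
      rw [hadd, List.foldl_append, ← ih s]

lemma pvOfList_map_congr {β : Type} [BEq β] [LawfulBEq β] {l l' : List β}
    (g : β → Int) (h : PySem.Set.ofList l = PySem.Set.ofList l') :
    PySem.Set.ofList (l.map g) = PySem.Set.ofList (l'.map g) := by
  have key : ∀ (m : List β), PySem.Set.ofList (m.map g)
      = (PySem.Set.ofList m).foldl (fun s b => PySem.Set.update s [g b]) [] := by
    intro m
    rw [← PySem.Set.update_nil_left (m.map g), List.map_eq_flatMap,
      pvUpdate_flatMap (fun b => [g b]) m, pvFoldl_update_dedup (fun b => [g b]) m]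
  rw [key l, key l', h]

lemma pvOfList_filter (p : Int → Bool) : ∀ (l : List Int),
    PySem.Set.ofList (l.filter p) = (PySem.Set.ofList l).filter p := by
  intro l
  induction l using List.reverseRecOn with
  | nil => rfl
  | append_singleton xs a ih =>
    rw [PySem.Set.ofList_append, PySem.Set.update_cons, PySem.Set.update_nil, List.filter_append]
    by_cases hp : p a
    · simp only [List.filter_cons, hp, if_pos, List.filter_nil]
      rw [PySem.Set.ofList_append, PySem.Set.update_cons, PySem.Set.update_nil, ih]
      by_cases ha : a ∈ xs
      · have h1 : (PySem.Set.ofList xs).add a = PySem.Set.ofList xs := by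
          simp [PySem.Set.add, PySem.Set.mem_ofList, ha]
        have h2 : PySem.Set.add ((PySem.Set.ofList xs).filter p) a = (PySem.Set.ofList xs).filter p := by
          have : a ∈ (PySem.Set.ofList xs).filter p :=
            List.mem_filter.2 ⟨(PySem.Set.mem_ofList xs a).2 ha, hp⟩
          simp [PySem.Set.add, this]
        rw [h1, h2]
      · have h1 : (PySem.Set.ofList xs).add a = PySem.Set.ofList xs ++ [a] := by
          simp [PySem.Set.add, PySem.Set.mem_ofList, ha]
        have h2 : PySem.Set.add ((PySem.Set.ofList xs).filter p) a = (PySem.Set.ofList xs).filter p ++ [a] := by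
          have : a ∉ (PySem.Set.ofList xs).filter p := fun hmem =>
            ha ((PySem.Set.mem_ofList xs a).1 (List.mem_filter.1 hmem).1)
          simp [PySem.Set.add, this]
        rw [h1, h2, List.filter_append]
        simp [hp]
    · simp only [List.filter_cons, hp, Bool.false_eq_true, if_neg, not_false_iff, List.filter_nil,
        List.append_nil, ih]
      by_cases ha : a ∈ xs
      · have h1 : (PySem.Set.ofList xs).add a = PySem.Set.ofList xs := by
          simp [PySem.Set.add, PySem.Set.mem_ofList, ha]
        rw [h1]
      · have h1 : (PySem.Set.ofList xs).add a = PySem.Set.ofList xs ++ [a] := by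
          simp [PySem.Set.add, PySem.Set.mem_ofList, ha]
        rw [h1, List.filter_append]
        simp [hp]

-- per-value inner key block, over a list D of candidate partners
def pvH (D : List Int) (x : Int) : List Int :=
  (D.filter (fun y => x != y)).map (fun y => PySem.Int.bxor x y)

lemma pvKeys_eq (A : List Int) :
    PySem.Set.ofList ((pvUA A).map (·.1))
      = PySem.Set.ofList ((pvUB (PySem.Dict.counter A).items).map (·.1)) := by
  have hA : (pvUA A).map (·.1) = A.flatMap (pvH A) := by
    simp only [pvUA, List.map_flatMap, List.map_map, Function.comp_def]
    rfl
  have hB : (pvUB (PySem.Dict.counter A).items).map (·.1)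
      = (PySem.Set.ofList A).flatMap (pvH (PySem.Set.ofList A)) := by
    simp only [pvUB, PySem.Dict.items_counter, List.map_flatMap, List.map_map, List.flatMap_map,
      List.filter_map, Function.comp_def]
    rfl
  rw [hA, hB]
  have hfold : ∀ (m : List Int) (g : Int → List Int), PySem.Set.ofList (m.flatMap g)
      = m.foldl (fun s x => PySem.Set.update s (g x)) [] := by
    intro m g
    rw [← PySem.Set.update_nil_left (m.flatMap g), pvUpdate_flatMap g m]
  rw [hfold A (pvH A), hfold (PySem.Set.ofList A) (pvH (PySem.Set.ofList A))]
  have hstep : (fun (s : PySem.Set Int) (x : Int) => PySem.Set.update s (pvH A x))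
      = (fun s x => PySem.Set.update s (pvH (PySem.Set.ofList A) x)) := by
    funext s x
    refine pvUpdate_congr ?_ s
    have h1 : PySem.Set.ofList (A.filter (fun y => x != y))
        = PySem.Set.ofList ((PySem.Set.ofList A).filter (fun y => x != y)) := by
      rw [PySem.Set.ofList_eq_self_of_nodup _ ((PySem.Set.nodup_ofList A).filter _),
        pvOfList_filter]
    exact pvOfList_map_congr _ h1
  rw [hstep]
  exact pvFoldl_update_dedup (pvH (PySem.Set.ofList A)) A []

-- ---- per-key sums ----

lemma pvSum_flatMap {β : Type} (f : β → List (Int × Int)) (k : Int) : ∀ (l : List β),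
    pvSum (l.flatMap f) k = (l.map (fun a => pvSum (f a) k)).sum := by
  intro l
  induction l with
  | nil => simp [pvSum]
  | cons a l ih => simp [pvSum, List.filter_append] at ih ⊢; omega

lemma pvSum_filter_ite {α : Type} (p : α → Bool) (v : α → Int × Int) (k : Int) : ∀ (l : List α),
    pvSum ((l.filter p).map v) k
      = (l.map (fun b => if p b && ((v b).1 == k) then (v b).2 else 0)).sum := by
  intro l
  induction l with
  | nil => simp [pvSum]
  | cons b l ih =>
    simp only [List.filter_cons]
    by_cases hp : p b
    · simp only [hp, if_pos, List.map_cons, pvSum, List.filter_cons, Bool.true_and]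
      by_cases hk : (v b).1 == k
      · simp only [hk, if_pos, List.map_cons, List.sum_cons]
        rw [show ((List.filter (fun p => p.1 == k) (List.map v (List.filter p l))).map (·.2)).sum
            = pvSum ((l.filter p).map v) k from rfl, ih]
      · simp only [hk, Bool.false_eq_true, if_neg, not_false_iff]
        rw [show ((List.filter (fun p => p.1 == k) (List.map v (List.filter p l))).map (·.2)).sum
            = pvSum ((l.filter p).map v) k from rfl, ih]
        simp
    · simp only [hp, Bool.false_eq_true, if_neg, not_false_iff, List.map_cons, List.sum_cons,
        Bool.false_and]
      rw [ih]
      simp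

lemma pvCount_sum (A : List Int) (f : Int → Int) :
    (A.map f).sum = ((PySem.Set.ofList A).map (fun x => (A.count x : Int) * f x)).sum := by
  have h1 : (A.map f).sum = ∑ m ∈ A.toFinset, (A.count m : Int) * f m := by
    simpa [nsmul_eq_mul] using Finset.sum_multiset_map_count (A : Multiset Int) f
  have hnd : (PySem.Set.ofList A).Nodup := PySem.Set.nodup_ofList A
  have h2 : ((PySem.Set.ofList A).map (fun x => (A.count x : Int) * f x)).sum
      = ∑ m ∈ (PySem.Set.ofList A).toFinset, (A.count m : Int) * f m :=
    (List.sum_toFinset _ hnd).symm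
  have h3 : (PySem.Set.ofList A).toFinset = A.toFinset := by
    ext x; simp [List.mem_toFinset, PySem.Set.mem_ofList]
  rw [h1, h2, h3]

lemma pvSum_eq (A : List Int) (k : Int) :
    pvSum (pvUA A) k = pvSum (pvUB (PySem.Dict.counter A).items) k := by
  have LA : pvSum (pvUA A) k
      = (A.map (fun a => (A.map (fun b =>
          if (a != b) && (PySem.Int.bxor a b == k) then (1 : Int) else 0)).sum)).sum := by
    rw [pvUA, pvSum_flatMap]
    refine congrArg List.sum (List.map_congr_left fun a _ => ?_)
    simpa using pvSum_filter_ite (fun b => a != b) (fun b => (PySem.Int.bxor a b, (1 : Int))) k A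
  have LB : pvSum (pvUB (PySem.Dict.counter A).items) k
      = ((PySem.Set.ofList A).map (fun x => ((PySem.Set.ofList A).map (fun y =>
          if (x != y) && (PySem.Int.bxor x y == k) then (A.count x : Int) * (A.count y : Int)
          else 0)).sum)).sum := by
    rw [pvUB, pvSum_flatMap, PySem.Dict.items_counter, List.map_map]
    refine congrArg List.sum (List.map_congr_left fun x _ => ?_)
    simp only [Function.comp_apply]
    rw [List.filter_map, List.map_map]
    simpa [Function.comp_def] using pvSum_filter_ite (fun y => x != y)
      (fun y => (PySem.Int.bxor x y, (A.count x : Int) * (A.count y : Int))) k (PySem.Set.ofList A)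
  rw [LA, LB, pvCount_sum A]
  refine congrArg List.sum (List.map_congr_left fun x _ => ?_)
  rw [pvCount_sum A, ← List.sum_map_mul_left]
  refine congrArg List.sum (List.map_congr_left fun y _ => ?_)
  by_cases hc : (x != y) && (PySem.Int.bxor x y == k)
  · simp [hc]
  · simp [hc]

-- ===== VERDICT (by name: the statement is the Claim_ definition above) =====
theorem difference_multiset_spec : Claim_equal_difference_multiset := by
  intro subset _
  show difference_multiset subset = difference_multiset_alt subset
  rw [pvA_flat, pvB_flat, pvItems_flat, pvItems_flat, pvKeys_eq]
  exact List.map_congr_left (fun k _ => by rw [pvSum_eq])
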